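-- pv_equiv track=rewrite | github.com/zxcvbnmz0x/gmpsystem | qrcode/modules/qrcodeinputmodule.py | merge_qrcode
-- ===== SOURCE A (Python) =====
-- def merge_qrcode(q_list, proportion_list):
--     q_list_merge = []
--     proportion_list_merge = []
--     for i in range(0, len(proportion_list)):
--         proprotion = proportion_list[i]
--         if proprotion in proportion_list_merge:
--             index = proportion_list_merge.index(proprotion)
--             q_list_merge[index] += q_list[i]
--         else:
--             proportion_list_merge.append(proprotion)
--             q_list_merge.append(q_list[i])
--     return q_list_merge, proportion_list_merge
-- ===== SOURCE B (Python) =====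
-- def merge_qrcode(q_list, proportion_list):
--     n = len(proportion_list)
--     proportion_list_merge = []
--     for p in proportion_list:
--         if p not in proportion_list_merge:
--             proportion_list_merge.append(p)
--     q_list_merge = [sum(q_list[i] for i in range(n) if proportion_list[i] == p)
--                     for p in proportion_list_merge]
--     return q_list_merge, proportion_list_merge
-- ===== Notes on version B (the rewrite author's own statement) =====
-- stated objective: alternative
-- what changed: Replaces A's single incremental pass (parallel result lists updated in place via an index scan) by two staged passes: first extract the distinct proportions in first-seen order, then compute each group's sum with an independent full scan per key; no running accumulator state is maintained.
import Mathlib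
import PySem

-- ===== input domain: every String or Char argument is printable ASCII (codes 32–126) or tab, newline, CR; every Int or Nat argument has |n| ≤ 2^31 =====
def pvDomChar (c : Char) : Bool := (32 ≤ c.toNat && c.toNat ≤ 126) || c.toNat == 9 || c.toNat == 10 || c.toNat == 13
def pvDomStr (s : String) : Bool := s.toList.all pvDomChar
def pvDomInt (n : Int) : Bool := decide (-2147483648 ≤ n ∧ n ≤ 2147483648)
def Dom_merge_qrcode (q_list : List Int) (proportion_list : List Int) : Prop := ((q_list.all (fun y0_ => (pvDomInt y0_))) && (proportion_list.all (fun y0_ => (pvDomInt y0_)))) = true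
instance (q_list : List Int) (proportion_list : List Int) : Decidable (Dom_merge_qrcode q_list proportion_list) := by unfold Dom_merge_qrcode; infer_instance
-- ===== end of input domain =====

-- B replaces A's single incremental pass (parallel lists updated via an index scan) by two
-- staged passes: extract the distinct proportions first, then sum each group by its own scan.


-- ===== PORT A =====
-- one loop step of A: p = proportion_list[i], q = q_list[i] (in-range under Pre_)
def mergeStepA (st : List Int × List Int) (p q : Int) : List Int × List Int :=
  if p ∈ st.2 then
    match PySem.List.index? st.2 p with
    | some idx => (st.1.set idx (st.1.getD idx 0 + q), st.2)
    | none => st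
  else
    (st.1 ++ [q], st.2 ++ [p])

def merge_qrcode (q_list : List Int) (proportion_list : List Int) : List Int × List Int :=
  (PySem.List.pyRange 0 (PySem.List.len proportion_list) 1).foldl
    (fun st i =>
      mergeStepA st (PySem.List.pyGetD proportion_list i 0) (PySem.List.pyGetD q_list i 0))
    ([], [])

-- ===== PORT B =====
def merge_qrcode_alt (q_list : List Int) (proportion_list : List Int) : List Int × List Int :=
  let n := PySem.List.len proportion_list
  let keys := proportion_list.foldl (fun ks p => if p ∈ ks then ks else ks ++ [p]) []
  let sums := keys.map (fun p =>
    (PySem.List.pyRange 0 n 1).foldl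
      (fun s i => if PySem.List.pyGetD proportion_list i 0 == p
                  then s + PySem.List.pyGetD q_list i 0 else s) 0)
  (sums, keys)

-- ===== PRECONDITION & SPEC =====
-- A indexes q_list[i] for every i < len(proportion_list): it raises IndexError iff q_list is shorter.
def Pre_merge_qrcode (q_list : List Int) (proportion_list : List Int) : Prop :=
  proportion_list.length ≤ q_list.length
instance (q_list : List Int) (proportion_list : List Int) : Decidable (Pre_merge_qrcode q_list proportion_list) := by unfold Pre_merge_qrcode; infer_instance

def pvWitness_merge_qrcode : List Int × List Int := ([1, 2, 3], [5, 7, 5])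

def Spec_merge_qrcode (q_list : List Int) (proportion_list : List Int) (out : List Int × List Int) : Prop := out = merge_qrcode_alt q_list proportion_list
instance (q_list : List Int) (proportion_list : List Int) (out : List Int × List Int) : Decidable (Spec_merge_qrcode q_list proportion_list out) := by unfold Spec_merge_qrcode; infer_instance

-- ===== CLAIM (what is proved, stated in full; the proofs are below) =====
def Claim_equal_merge_qrcode : Prop := ∀ (q_list : List Int) (proportion_list : List Int), Dom_merge_qrcode q_list proportion_list → Pre_merge_qrcode q_list proportion_list → Spec_merge_qrcode q_list proportion_list (merge_qrcode q_list proportion_list)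

-- ===== LEMMAS AND PROOFS =====

-- first-seen distinct keys of a (key, value) list
def keysF (t : List (Int × Int)) : List Int :=
  t.foldl (fun ks z => if z.1 ∈ ks then ks else ks ++ [z.1]) []

-- sum of the values grouped under key p
def gsum (t : List (Int × Int)) (p : Int) : Int :=
  ((t.filter (fun z => z.1 == p)).map Prod.snd).sum

theorem keysF_append_singleton (s : List (Int × Int)) (x : Int × Int) :
    keysF (s ++ [x]) = if x.1 ∈ keysF s then keysF s else keysF s ++ [x.1] := by
  simp [keysF, List.foldl_append]

theorem mem_keysF (t : List (Int × Int)) (p : Int) :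
    p ∈ keysF t ↔ p ∈ t.map Prod.fst := by
  induction t using List.reverseRecOn with
  | nil => simp [keysF]
  | append_singleton s x ih =>
    rw [keysF_append_singleton]
    by_cases h : x.1 ∈ keysF s
    · rw [if_pos h]
      simp only [List.map_append, List.mem_append, List.map_cons, List.map_nil,
        List.not_mem_nil, or_false, List.mem_cons]
      constructor
      · exact fun hp => Or.inl (ih.mp hp)
      · rintro (hp | hp)
        · exact ih.mpr hp
        · subst hp; exact h
    · rw [if_neg h]
      simp only [List.mem_append, List.map_append, List.map_cons,
        List.map_nil, List.mem_cons, List.not_mem_nil, or_false, ih]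

theorem nodup_keysF (t : List (Int × Int)) : (keysF t).Nodup := by
  induction t using List.reverseRecOn with
  | nil => simp [keysF]
  | append_singleton s x ih =>
    rw [keysF_append_singleton]
    by_cases h : x.1 ∈ keysF s
    · simpa [h] using ih
    · rw [if_neg h, List.nodup_append]
      refine ⟨ih, List.nodup_singleton _, ?_⟩
      intro a ha b hb
      rw [List.mem_singleton] at hb
      subst hb
      exact fun he => h (he ▸ ha)

theorem gsum_append_singleton (s : List (Int × Int)) (x : Int × Int) (p : Int) :
    gsum (s ++ [x]) p = gsum s p + if x.1 = p then x.2 else 0 := by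
  simp only [gsum, List.filter_append]
  by_cases h : x.1 = p <;> simp [h]

theorem gsum_eq_zero (t : List (Int × Int)) (p : Int) (h : p ∉ t.map Prod.fst) :
    gsum t p = 0 := by
  have : t.filter (fun z => z.1 == p) = [] := by
    apply List.filter_eq_nil_iff.mpr
    intro z hz hzp
    exact h (List.mem_map.mpr ⟨z, hz, by simpa using hzp⟩)
  simp [gsum, this]

-- characterisation of A's loop: state = (group sums over the prefix, first-seen keys)
theorem foldA_eq (t : List (Int × Int)) :
    t.foldl (fun st z => mergeStepA st z.1 z.2) ([], [])
      = ((keysF t).map (gsum t), keysF t) := by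
  induction t using List.reverseRecOn with
  | nil => simp [keysF]
  | append_singleton s x ih =>
    rw [List.foldl_append, ih]
    simp only [List.foldl_cons, List.foldl_nil]
    by_cases h : x.1 ∈ keysF s
    · -- update case
      obtain ⟨idx, hidx⟩ := Option.isSome_iff_exists.mp
        ((PySem.List.index?_isSome_iff (keysF s) x.1).mpr h)
      obtain ⟨hk, hval, _⟩ := PySem.List.getElem_of_index?_eq_some hidx
      have hstep : mergeStepA ((keysF s).map (gsum s), keysF s) x.1 x.2
          = (((keysF s).map (gsum s)).set idx (gsum s x.1 + x.2), keysF s) := by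
        simp only [mergeStepA, h, if_pos, hidx]
        have : ((keysF s).map (gsum s)).getD idx 0 = gsum s x.1 := by
          rw [List.getD_eq_getElem _ _ (by simpa using hk)]
          simp [hval]
        rw [this]
      rw [hstep, keysF_append_singleton]
      simp only [h, if_pos]
      congr 1
      apply List.ext_getElem
      · simp
      · intro j hj1 hj2
        have hjk : j < (keysF s).length := by simpa using hj2
        simp only [List.getElem_set, List.getElem_map, gsum_append_singleton]
        by_cases hje : j = idx
        · subst hje
          simp [hval]
        · have hne : x.1 ≠ (keysF s)[j] := by
            intro hcontra
            exact hje ((List.Nodup.getElem_inj_iff (nodup_keysF s)).mp (hval.trans hcontra)).symm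
          rw [if_neg (by simpa using Ne.symm hje), if_neg hne]
          simp
    · -- append case
      have hstep : mergeStepA ((keysF s).map (gsum s), keysF s) x.1 x.2
          = ((keysF s).map (gsum s) ++ [x.2], keysF s ++ [x.1]) := by
        simp [mergeStepA, h]
      rw [hstep, keysF_append_singleton]
      simp only [h, if_false]
      congr 1
      rw [List.map_append]
      congr 1
      · apply List.map_congr_left
        intro p hp
        rw [gsum_append_singleton]
        have : x.1 ≠ p := fun he => h (he ▸ hp)
        simp [this]
      · have h0 : gsum s x.1 = 0 := gsum_eq_zero s x.1 (fun hm => h ((mem_keysF s x.1).mpr hm))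
        simp [gsum_append_singleton, h0]

theorem map_pyGetD_pair (ql pl : List Int) (h : pl.length ≤ ql.length) :
    (PySem.List.pyRange 0 (PySem.List.len pl) 1).map
      (fun i => (PySem.List.pyGetD pl i 0, PySem.List.pyGetD ql i 0)) = pl.zip ql := by
  apply List.ext_getElem
  · simp [PySem.List.length_pyRange_one, PySem.List.len]
    omega
  · intro j hj1 hj2
    have hjl : j < pl.length := by
      simpa [PySem.List.length_pyRange_one, PySem.List.len] using hj1
    have hjq : j < ql.length := lt_of_lt_of_le hjl h
    simp only [List.getElem_map, List.getElem_zip]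
    rw [PySem.List.getElem_pyRange_one]
    simp [PySem.List.pyGetD_natCast, hjl, hjq]

theorem foldl_if_gsum (p : Int) (t : List (Int × Int)) (a : Int) :
    t.foldl (fun s z => if z.1 == p then s + z.2 else s) a = a + gsum t p := by
  induction t generalizing a with
  | nil => simp [gsum]
  | cons x xs ih =>
    simp only [List.foldl_cons, gsum, List.filter_cons]
    by_cases h : x.1 = p
    · have hb : (x.1 == p) = true := by simpa using h
      simp only [hb, if_true, List.map_cons, List.sum_cons]
      rw [ih (a + x.2)]
      simp only [gsum]
      ring
    · have hb : (x.1 == p) = false := by simpa using h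
      simp only [hb, if_false, Bool.false_eq_true]
      exact ih a

-- ===== VERDICT (by name: the statement is the Claim_ definition above) =====
theorem merge_qrcode_spec : Claim_equal_merge_qrcode := by
  intro ql pl _ hpre
  unfold Spec_merge_qrcode
  have hpre' : pl.length ≤ ql.length := hpre
  have hA : merge_qrcode ql pl
      = ((keysF (pl.zip ql)).map (gsum (pl.zip ql)), keysF (pl.zip ql)) := by
    unfold merge_qrcode
    rw [← foldA_eq, ← map_pyGetD_pair ql pl hpre', List.foldl_map]
  have hkeys : pl.foldl (fun ks p => if p ∈ ks then ks else ks ++ [p]) []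
      = keysF (pl.zip ql) := by
    conv_lhs => rw [← List.map_fst_zip (l₂ := ql) hpre']
    rw [List.foldl_map]
    rfl
  have hB : merge_qrcode_alt ql pl
      = ((keysF (pl.zip ql)).map (gsum (pl.zip ql)), keysF (pl.zip ql)) := by
    simp only [merge_qrcode_alt]
    rw [hkeys]
    congr 1
    apply List.map_congr_left
    intro p _
    have h1 := foldl_if_gsum p (pl.zip ql) 0
    rw [zero_add] at h1
    rw [← h1, ← map_pyGetD_pair ql pl hpre', List.foldl_map]
  rw [hA, hB]
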